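-- pv_equiv track=rewrite | github.com/pxddubny/repo1 | IGI/LR3/Task5/task5.py | sum_between_negative
-- ===== SOURCE A (Python) =====
-- def sum_between_negative(arr):
--     sum = 0
--     summing = False
--     for x in arr:
--         if (x < 0 and summing == True): break
--         if (summing): sum += x
--         if (x < 0 and summing == False): summing = True
--     return sum
-- ===== SOURCE B (Python) =====
-- def sum_between_negative(arr):
--     idx = [i for i, x in enumerate(arr) if x < 0]
--     if not idx:
--         return 0
--     end = idx[1] if len(idx) > 1 else len(arr)
--     return sum(arr[idx[0] + 1:end])
-- ===== Notes on version B (the rewrite author's own statement) =====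
-- stated objective: simpler
-- what changed: Replaces the stateful one-pass scan with a boolean 'summing' flag and break by building the list of negative positions first and returning one slice-sum between the first negative and the second (or the end).
import Mathlib
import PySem

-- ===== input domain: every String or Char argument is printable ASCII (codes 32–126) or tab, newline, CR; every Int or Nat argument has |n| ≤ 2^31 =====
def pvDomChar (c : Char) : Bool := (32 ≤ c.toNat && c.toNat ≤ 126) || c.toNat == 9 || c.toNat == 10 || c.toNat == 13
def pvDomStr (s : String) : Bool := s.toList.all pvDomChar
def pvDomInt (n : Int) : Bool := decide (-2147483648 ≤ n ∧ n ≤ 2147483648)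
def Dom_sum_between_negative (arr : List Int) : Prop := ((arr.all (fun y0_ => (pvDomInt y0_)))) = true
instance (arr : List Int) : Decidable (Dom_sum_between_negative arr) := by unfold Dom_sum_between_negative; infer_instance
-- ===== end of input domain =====

-- B replaces A's stateful scan (a 'summing' flag with break) by collecting the
-- negative positions first and summing one slice; objective: simpler.

-- ===== PORT A =====
-- the for-loop with break, state (sum, summing)
def sumBNloop : List Int → Int → Bool → Int
  | [], s, _ => s
  | x :: xs, s, summing =>
    if x < 0 ∧ summing = true then s
    else
      sumBNloop xs (if summing then s + x else s)
        (if x < 0 ∧ summing = false then true else summing)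

def sum_between_negative (arr : List Int) : Int :=
  sumBNloop arr 0 false

-- ===== PORT B =====
def sum_between_negative_alt (arr : List Int) : Int :=
  let idx := ((PySem.List.enumerate arr).filter (fun p => decide (p.2 < 0))).map (·.1)
  match idx with
  | [] => 0
  | s :: rest =>
    let e : Int := match rest with
      | e :: _ => e
      | [] => (arr.length : Int)
    (PySem.List.slice arr (some (s + 1)) (some e)).sum

-- ===== PRECONDITION & SPEC =====
def Spec_sum_between_negative (arr : List Int) (out : Int) : Prop := out = sum_between_negative_alt arr
instance (arr : List Int) (out : Int) : Decidable (Spec_sum_between_negative arr out) := by unfold Spec_sum_between_negative; infer_instance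

-- ===== CLAIM (what is proved, stated in full; the proofs are below) =====
def Claim_equal_sum_between_negative : Prop := ∀ (arr : List Int), Dom_sum_between_negative arr → Spec_sum_between_negative arr (sum_between_negative arr)

-- ===== LEMMAS AND PROOFS =====

theorem sumBNloop_skip (p l : List Int) (s : Int) (h : ∀ y ∈ p, 0 ≤ y) :
    sumBNloop (p ++ l) s false = sumBNloop l s false := by
  induction p with
  | nil => rfl
  | cons y ys ih =>
    have hy : ¬ (y < 0) := not_lt.2 (h y (List.mem_cons_self ..))
    simp [sumBNloop, hy]
    exact ih fun z hz => h z (List.mem_cons_of_mem _ hz)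

theorem sumBNloop_sum (t : List Int) (s : Int) :
    sumBNloop t s true = s + (t.takeWhile (fun x => decide (0 ≤ x))).sum := by
  induction t generalizing s with
  | nil => simp [sumBNloop]
  | cons y ys ih =>
    by_cases hy : y < 0
    · simp [sumBNloop, hy, not_le.2 hy]
    · simp [sumBNloop, hy, not_lt.1 hy, ih, add_assoc]

theorem filter_enumerate_nonneg (p : List Int) (s : Int) (h : ∀ y ∈ p, 0 ≤ y) :
    (PySem.List.enumerate p s).filter (fun q => decide (q.2 < 0)) = [] := by
  rw [List.filter_eq_nil_iff]
  intro q hq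
  rcases (PySem.List.mem_enumerate_iff _ _ _).1 hq with ⟨k, hk, rfl⟩
  simpa using not_lt.2 (h _ (p.getElem_mem hk))

-- ===== VERDICT (by name: the statement is the Claim_ definition above) =====
theorem head_dropWhile_neg (l : List Int) (x : Int) (t : List Int)
    (h : l.dropWhile (fun z => decide (0 ≤ z)) = x :: t) : x < 0 := by
  have hne : l.dropWhile (fun z => decide (0 ≤ z)) ≠ [] := by simp [h]
  have := List.head_dropWhile_not (p := fun z : Int => decide (0 ≤ z)) (l := l) hne
  simp only [h, List.head_cons] at this
  simpa using this

theorem takeWhile_eq_self_of_dropWhile_nil (l : List Int)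
    (h : l.dropWhile (fun z => decide (0 ≤ z)) = []) :
    l.takeWhile (fun z => decide (0 ≤ z)) = l := by
  have := List.takeWhile_append_dropWhile (p := fun z : Int => decide (0 ≤ z)) (l := l)
  rw [h] at this
  simpa using this

theorem nonneg_of_takeWhile (l : List Int) :
    ∀ y ∈ l.takeWhile (fun z => decide (0 ≤ z)), 0 ≤ y := by
  intro y hy
  simpa using List.mem_takeWhile_imp hy

theorem sum_between_negative_spec : Claim_equal_sum_between_negative := by
  intro arr _
  unfold Spec_sum_between_negative
  set pr : Int → Bool := fun z => decide (0 ≤ z) with hpr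
  have hPD : arr.takeWhile pr ++ arr.dropWhile pr = arr := List.takeWhile_append_dropWhile
  set P := arr.takeWhile pr with hPdef
  have hP : ∀ y ∈ P, 0 ≤ y := nonneg_of_takeWhile arr
  cases hD : arr.dropWhile pr with
  | nil =>
    -- no negative element at all: both sides are 0
    rw [hD] at hPD; simp at hPD
    have hall : ∀ y ∈ arr, 0 ≤ y := by rw [← hPD]; exact hP
    have hA : sum_between_negative arr = 0 := by
      unfold sum_between_negative
      have := sumBNloop_skip arr [] 0 hall
      simpa using this
    have hB : sum_between_negative_alt arr = 0 := by
      unfold sum_between_negative_alt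
      rw [filter_enumerate_nonneg arr 0 hall]
      simp
    rw [hA, hB]
  | cons x t =>
    have hx : x < 0 := head_dropWhile_neg arr x t hD
    rw [hD] at hPD
    -- A's value
    have hA : sum_between_negative arr = (t.takeWhile pr).sum := by
      unfold sum_between_negative
      rw [← hPD, sumBNloop_skip P (x :: t) 0 hP]
      simp only [sumBNloop, hx]
      simpa using sumBNloop_sum t 0
    -- B's idx head
    have henum : PySem.List.enumerate arr 0 =
        PySem.List.enumerate P 0 ++ PySem.List.enumerate (x :: t) (0 + P.length) := by
      rw [← hPD]; exact PySem.List.enumerate_append ..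
    have hdropP : arr.drop (P.length + 1) = t := by
      rw [← hPD, show P ++ x :: t = (P ++ [x]) ++ t by simp]
      rw [List.drop_left' (by simp)]
    have hlen : arr.length = P.length + 1 + t.length := by rw [← hPD]; simp; ring
    rw [hA]
    unfold sum_between_negative_alt
    rw [henum, List.filter_append, filter_enumerate_nonneg P 0 hP, List.nil_append,
        PySem.List.enumerate_cons]
    simp only [List.filter_cons, hx, decide_true, if_true]
    set P2 := t.takeWhile pr with hP2def
    have hP2 : ∀ y ∈ P2, 0 ≤ y := nonneg_of_takeWhile t
    have hPD2 : P2 ++ t.dropWhile pr = t := List.takeWhile_append_dropWhile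
    cases hD2 : t.dropWhile pr with
    | nil =>
      -- only one negative: sum to the end
      have hall : ∀ y ∈ t, 0 ≤ y := by
        rw [← hPD2, hD2]; simpa using hP2
      rw [filter_enumerate_nonneg t _ hall]
      have hcast : (0 + (P.length : Int)) + 1 = ((P.length + 1 : Nat) : Int) := by push_cast; ring
      simp only [List.map_cons, List.map_nil, hcast]
      rw [PySem.List.slice_natCast, hdropP, hlen]
      have ht : t.take (P.length + 1 + t.length - (P.length + 1)) = t := by
        have he : P.length + 1 + t.length - (P.length + 1) = t.length := by omega
        rw [he, List.take_length]
      rw [ht]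
      have : t.takeWhile pr = t := takeWhile_eq_self_of_dropWhile_nil t hD2
      rw [hP2def, this]
    | cons y t2 =>
      -- second negative at position P.length + 1 + P2.length
      have hy : y < 0 := head_dropWhile_neg t y t2 hD2
      rw [hD2] at hPD2
      have henum2 : PySem.List.enumerate t (0 + (P.length : Int) + 1) =
          PySem.List.enumerate P2 (0 + (P.length : Int) + 1) ++
            PySem.List.enumerate (y :: t2) (0 + (P.length : Int) + 1 + P2.length) := by
        rw [← hPD2]; exact PySem.List.enumerate_append ..
      rw [henum2, List.filter_append, filter_enumerate_nonneg P2 _ hP2, List.nil_append,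
          PySem.List.enumerate_cons]
      simp only [List.filter_cons, hy, decide_true, if_true]
      have hcast : (0 + (P.length : Int)) + 1 = ((P.length + 1 : Nat) : Int) := by push_cast; ring
      have hcast2 : (((P.length + 1 : Nat) : Int)) + (P2.length : Int) =
          ((P.length + 1 + P2.length : Nat) : Int) := by push_cast; ring
      simp only [List.map_cons]
      rw [hcast, hcast2, PySem.List.slice_natCast, hdropP]
      have ht : t.take (P.length + 1 + P2.length - (P.length + 1)) = P2 := by
        have : P.length + 1 + P2.length - (P.length + 1) = P2.length := by omega
        rw [this, ← hPD2]
        exact List.take_left ..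
      rw [ht, hP2def]
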